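-- pv_equiv track=rewrite | github.com/kingbenjamin03/DailyLetterGame | daily_game/features.py | consonant_runs
-- ===== SOURCE A (Python) =====
-- VOWELS = set("aeiou")
--
-- def consonant_runs(w: str) -> int:
--     """Number of maximal consonant runs."""
--     if not w:
--         return 0
--     w = w.lower()
--     runs = 0
--     in_run = False
--     for c in w:
--         is_cons = c.isalpha() and c not in VOWELS
--         if is_cons and not in_run:
--             runs += 1
--             in_run = True
--         elif not is_cons:
--             in_run = False
--     return runs
-- ===== SOURCE B (Python) =====
-- def consonant_runs(w: str) -> int:
--     """Number of maximal consonant runs: blank out every non-consonant and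
--     count the whitespace-separated tokens that remain."""
--     masked = "".join(c if c.isalpha() and c not in "aeiou" else " " for c in w.lower())
--     return len(masked.split())
-- ===== Notes on version B (the rewrite author's own statement) =====
-- stated objective: idiomatic
-- what changed: Replaces the explicit in_run state-machine loop with a two-stage tokenization: map every non-consonant character to a space and count the tokens of str.split().
import Mathlib
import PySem

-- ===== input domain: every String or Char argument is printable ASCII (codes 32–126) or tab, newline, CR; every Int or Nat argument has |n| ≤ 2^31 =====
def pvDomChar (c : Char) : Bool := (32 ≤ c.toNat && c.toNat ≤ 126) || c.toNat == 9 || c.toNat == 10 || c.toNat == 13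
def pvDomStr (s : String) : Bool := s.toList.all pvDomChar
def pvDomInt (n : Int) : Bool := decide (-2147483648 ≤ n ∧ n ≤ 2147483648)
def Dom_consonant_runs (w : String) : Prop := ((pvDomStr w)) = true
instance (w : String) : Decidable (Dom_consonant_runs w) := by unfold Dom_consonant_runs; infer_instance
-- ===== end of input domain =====

-- B replaces A's in_run state-machine loop by masking non-consonants to spaces and counting str.split() tokens (idiomatic, same O(n) cost).

-- ===== PORT A =====
-- A's loop body: state = (runs, in_run); is_cons = c.isalpha() and c not in VOWELS
def pvStepA (st : Int × Bool) (c : Char) : Int × Bool :=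
  let is_cons := PySem.Chars.isalpha c && !(['a','e','i','o','u'].contains c)
  if is_cons && !st.2 then (st.1 + 1, true)
  else if !is_cons then (st.1, false)
  else st

def consonant_runs (w : String) : Int :=
  if w.toList = [] then 0
  else
    let s := PySem.Str.lower w
    (s.toList.foldl pvStepA (0, false)).1

-- ===== PORT B =====
-- B's masking: c if it is a consonant else ' '
def pvMaskB (c : Char) : Char :=
  if PySem.Chars.isalpha c && !("aeiou".toList.contains c) then c else ' '

def consonant_runs_alt (w : String) : Int :=
  let masked := String.ofList ((PySem.Str.lower w).toList.map pvMaskB)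
  ((PySem.Str.split₀ masked).length : Int)

-- ===== PRECONDITION & SPEC =====
def Spec_consonant_runs (w : String) (out : Int) : Prop := out = consonant_runs_alt w
instance (w : String) (out : Int) : Decidable (Spec_consonant_runs w out) := by unfold Spec_consonant_runs; infer_instance

-- ===== CLAIM (what is proved, stated in full; the proofs are below) =====
def Claim_equal_consonant_runs : Prop := ∀ (w : String), Dom_consonant_runs w → Spec_consonant_runs w (consonant_runs w)

-- ===== LEMMAS AND PROOFS =====

def pvConsA (c : Char) : Bool := PySem.Chars.isalpha c && !(['a','e','i','o','u'].contains c)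

-- A's count as a run-start counter with flag b = "previous char was a consonant".
def pvCountA (b : Bool) : List Char → Nat
  | [] => 0
  | c :: cs => (if pvConsA c && !b then 1 else 0) + pvCountA (pvConsA c) cs

lemma pvStepA_eq (r : Int) (b : Bool) (c : Char) :
    pvStepA (r, b) c = ((if pvConsA c && !b then r + 1 else r), pvConsA c) := by
  unfold pvStepA pvConsA
  cases hc : PySem.Chars.isalpha c && !(['a','e','i','o','u'].contains c) <;>
    cases b <;> simp [hc]

lemma pvLoopA (l : List Char) : ∀ (r : Int) (b : Bool),
    (l.foldl pvStepA (r, b)).1 = r + (pvCountA b l : Int) := by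
  induction l with
  | nil => intro r b; simp [pvCountA]
  | cons c cs ih =>
    intro r b
    rw [List.foldl_cons, pvStepA_eq, ih, pvCountA]
    cases hc : (pvConsA c && !b) <;> simp <;> ring

-- Word counter of split₀.go, with flag b = "a word is pending".
def pvW : List Char → Bool → Nat
  | [], b => if b then 1 else 0
  | c :: cs, b => if PySem.Chars.isspace c then (if b then 1 else 0) + pvW cs false
                  else pvW cs true

lemma pvGo_length (m : List Char) : ∀ (cur : List Char) (acc : List (List Char)),
    (PySem.Chars.split₀.go m cur acc).length = acc.length + pvW m (!cur.isEmpty) := by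
  induction m with
  | nil =>
    intro cur acc
    unfold PySem.Chars.split₀.go pvW
    cases cur <;> simp
  | cons c cs ih =>
    intro cur acc
    unfold PySem.Chars.split₀.go pvW
    by_cases hs : PySem.Chars.isspace c = true
    · simp only [hs, if_true]
      cases cur <;> simp [ih] <;> omega
    · rw [if_neg hs, if_neg hs, ih]
      simp

-- a letter is never whitespace
lemma pvAlpha_not_space (c : Char) (h : PySem.Chars.isalpha c = true) :
    PySem.Chars.isspace c = false := by
  unfold PySem.Chars.isalpha PySem.Chars.isupper PySem.Chars.islower at h
  unfold PySem.Chars.isspace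
  have hA : ('A' : Char).val.toNat = 65 := rfl
  have hZ : ('Z' : Char).val.toNat = 90 := rfl
  have ha : ('a' : Char).val.toNat = 97 := rfl
  have hz : ('z' : Char).val.toNat = 122 := rfl
  simp only [Bool.or_eq_true, Bool.and_eq_true, decide_eq_true_eq, Char.le_def,
    UInt32.le_iff_toNat_le, hA, hZ, ha, hz] at h
  simp only [Bool.or_eq_false_iff, Bool.and_eq_false_iff, decide_eq_false_iff_not, Char.toNat]
  omega

-- masked chars: a consonant stays (never whitespace), everything else becomes a space
lemma pvIsspace_mask (c : Char) : PySem.Chars.isspace (pvMaskB c) = !pvConsA c := by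
  have hlist : ("aeiou".toList.contains c) = (['a','e','i','o','u'].contains c) := rfl
  unfold pvMaskB pvConsA
  rw [hlist]
  by_cases h : (PySem.Chars.isalpha c && !(['a','e','i','o','u'].contains c)) = true
  · rw [if_pos h, h, Bool.not_true]
    exact pvAlpha_not_space c (by
      cases ha : PySem.Chars.isalpha c
      · rw [ha] at h; simp at h
      · rfl)
  · rw [if_neg h]
    cases hx : (PySem.Chars.isalpha c && !(['a','e','i','o','u'].contains c))
    · rfl
    · exact absurd hx h

-- pending-word counting over the masked list vs run-start counting
lemma pvW_mask (l : List Char) : ∀ b : Bool,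
    pvW (l.map pvMaskB) b = pvCountA b l + (if b then 1 else 0) := by
  induction l with
  | nil => intro b; simp [pvW, pvCountA]
  | cons c cs ih =>
    intro b
    simp only [List.map_cons]
    rw [pvW, pvIsspace_mask, pvCountA]
    cases hc : pvConsA c
    · simp [ih, Nat.add_comm]
    · cases b <;> simp [ih] <;> omega

theorem consonant_runs_spec : Claim_equal_consonant_runs := by
  intro w _
  unfold Spec_consonant_runs consonant_runs consonant_runs_alt
  have hB : ((PySem.Str.split₀
      (String.ofList ((PySem.Str.lower w).toList.map pvMaskB))).length : Int)
      = (pvCountA false (PySem.Str.lower w).toList : Int) := by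
    rw [PySem.Str.split₀]
    rw [List.length_map]
    have htl : (String.ofList ((PySem.Str.lower w).toList.map pvMaskB)).toList
        = (PySem.Str.lower w).toList.map pvMaskB := by
      simp
    rw [PySem.Chars.split₀, htl, pvGo_length, pvW_mask]
    simp
  by_cases h : w.toList = []
  · have hlw : (PySem.Str.lower w).toList = [] := by
      rw [PySem.Str.toList_lower, h]; rfl
    simp only [if_pos h, hB, hlw]
    rfl
  · simp only [if_neg h, hB, pvLoopA]
    simp
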